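-- pv_equiv track=rewrite | github.com/sjdeak/interview-practice | dp/advanced/Minimum_Score_Triangulation_of_Polygon.py | getAdditionalTriangle
-- ===== SOURCE A (Python) =====
-- def getAdditionalTriangle(nowS, i):
--   """
--   计算新增下标为i的节点后，增加的value
--   """
--   s = bin(nowS)[2:]
--   i = len(s) - 1 - i
--   adjacents = []
--   for k in range(1, 50 + 1):
--     li, ri = i - k, i + k
--     if li in range(len(s)) and s[li] == '1':
--       adjacents.append(li)
--     if len(adjacents) == 2:
--       break
--     if ri in range(len(s)) and s[ri] == '1':
--       adjacents.append(ri)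
--     if len(adjacents) == 2:
--       break
--
--   return adjacents + [i]
-- ===== SOURCE B (Python) =====
-- def getAdditionalTriangle(nowS, i):
--     s = bin(nowS)[2:]
--     i = len(s) - 1 - i
--     cands = [p for p in range(len(s)) if s[p] == '1' and 1 <= abs(p - i) <= 50]
--     cands.sort(key=lambda p: 2 * abs(p - i) + (0 if p < i else 1))
--     return cands[:2] + [i]
-- ===== Notes on version B (the rewrite author's own statement) =====
-- stated objective: alternative
-- what changed: Replaces the outward symmetric scan with incremental radius and early break by a single collect-filter pass over all positions followed by a stable sort on the key 2*abs(p-i)+(0 if p<i else 1) and taking the first two entries.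
import Mathlib
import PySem

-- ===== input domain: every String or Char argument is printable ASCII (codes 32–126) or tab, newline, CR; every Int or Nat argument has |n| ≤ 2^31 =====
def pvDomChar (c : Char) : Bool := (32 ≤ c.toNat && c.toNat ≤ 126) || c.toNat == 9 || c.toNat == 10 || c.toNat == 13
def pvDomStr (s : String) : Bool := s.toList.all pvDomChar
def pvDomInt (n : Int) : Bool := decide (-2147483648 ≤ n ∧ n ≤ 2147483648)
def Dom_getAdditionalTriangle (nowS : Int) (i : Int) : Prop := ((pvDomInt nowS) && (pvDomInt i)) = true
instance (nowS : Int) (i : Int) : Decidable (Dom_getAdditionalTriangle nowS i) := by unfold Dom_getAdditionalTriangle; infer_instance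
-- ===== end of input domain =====

-- B replaces A's outward symmetric scan with early break by a collect-filter pass over all
-- positions followed by a stable sort on the distance/side key and taking the first two
-- entries (objective: alternative decomposition, not faster).

-- ===== PORT A =====
-- `p in range(len(s)) and s[p] == '1'` (indexing happens only after the range guard)
def pvValidA (s : List Char) (p : Int) : Bool :=
  decide (0 ≤ p ∧ p < (s.length : Int)) && (PySem.List.pyGet? s p == some '1')

-- the `for k in range(1, 50 + 1)` loop with its two `break`s, over the remaining ks and
-- the accumulator `adjacents`
def pvLoopA (s : List Char) (iF : Int) : List Int → List Int → List Int
  | [], acc => acc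
  | k :: ks, acc =>
    let acc1 := if pvValidA s (iF - k) then acc ++ [iF - k] else acc
    if acc1.length = 2 then acc1
    else
      let acc2 := if pvValidA s (iF + k) then acc1 ++ [iF + k] else acc1
      if acc2.length = 2 then acc2 else pvLoopA s iF ks acc2

def getAdditionalTriangle (nowS : Int) (i : Int) : List Int :=
  let s := (PySem.Int.toBinChars0b nowS).drop 2   -- bin(nowS)[2:]  (xs[2:] = drop 2, exact)
  let iF := (s.length : Int) - 1 - i              -- i = len(s) - 1 - i
  pvLoopA s iF (PySem.List.pyRange 1 51 1) [] ++ [iF]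

-- ===== PORT B =====
-- sort key: 2 * abs(p - i) + (0 if p < i else 1)
def pvKeyB (iF p : Int) : Int := 2 * |p - iF| + (if p < iF then 0 else 1)

-- [p for p in range(len(s)) if s[p] == '1' and 1 <= abs(p - i) <= 50]
def pvCandB (s : List Char) (iF : Int) : List Int :=
  (PySem.List.pyRange 0 (s.length : Int) 1).filter
    (fun p => (PySem.List.pyGet? s p == some '1') && decide (1 ≤ |p - iF| ∧ |p - iF| ≤ 50))

def getAdditionalTriangle_alt (nowS : Int) (i : Int) : List Int :=
  let s := (PySem.Int.toBinChars0b nowS).drop 2   -- bin(nowS)[2:]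
  let iF := (s.length : Int) - 1 - i
  (PySem.List.sorted (pvCandB s iF) (pvKeyB iF)).take 2 ++ [iF]

-- ===== PRECONDITION & SPEC =====
def Spec_getAdditionalTriangle (nowS : Int) (i : Int) (out : List Int) : Prop := out = getAdditionalTriangle_alt nowS i
instance (nowS : Int) (i : Int) (out : List Int) : Decidable (Spec_getAdditionalTriangle nowS i out) := by unfold Spec_getAdditionalTriangle; infer_instance

-- ===== CLAIM (what is proved, stated in full; the proofs are below) =====
def Claim_equal_getAdditionalTriangle : Prop := ∀ (nowS : Int) (i : Int), Dom_getAdditionalTriangle nowS i → Spec_getAdditionalTriangle nowS i (getAdditionalTriangle nowS i)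

-- ===== LEMMAS AND PROOFS =====

-- one radius step of A's scan: left candidate then right candidate
def pvG (s : List Char) (iF k : Int) : List Int :=
  (if pvValidA s (iF - k) then [iF - k] else []) ++ (if pvValidA s (iF + k) then [iF + k] else [])

-- A's loop with its breaks computes take 2 of the full scan list
theorem pvTake2_pre (l1 l2 : List Int) (h : l1.length = 2) : (l1 ++ l2).take 2 = l1 := by
  rw [List.take_append_of_le_length (by omega), List.take_of_length_le (by omega)]

theorem pvIf_push (c : Bool) (acc : List Int) (x : Int) :
    (if c = true then acc ++ [x] else acc) = acc ++ (if c = true then [x] else []) := by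
  cases c <;> simp

theorem pvIf_len_le (c : Bool) (x : Int) : (if c = true then [x] else []).length ≤ 1 := by
  cases c <;> simp

theorem pvLoopA_eq_take (s : List Char) (iF : Int) :
    ∀ (ks : List Int) (acc : List Int), acc.length < 2 →
      pvLoopA s iF ks acc = (acc ++ ks.flatMap (pvG s iF)).take 2 := by
  intro ks
  induction ks with
  | nil =>
    intro acc h
    simp [pvLoopA, List.take_of_length_le (by omega : acc.length ≤ 2)]
  | cons k ks ih =>
    intro acc h
    simp only [pvLoopA, List.flatMap_cons, pvG, pvIf_push, ← List.append_assoc]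
    have hL := pvIf_len_le (pvValidA s (iF - k)) (iF - k)
    have hR := pvIf_len_le (pvValidA s (iF + k)) (iF + k)
    by_cases hA : (acc ++ (if pvValidA s (iF - k) = true then [iF - k] else [])).length = 2
    · rw [if_pos hA, List.append_assoc _ _ (List.flatMap _ _), pvTake2_pre _ _ hA]
    · rw [if_neg hA]
      by_cases hB : (acc ++ (if pvValidA s (iF - k) = true then [iF - k] else []) ++
          (if pvValidA s (iF + k) = true then [iF + k] else [])).length = 2
      · rw [if_pos hB, pvTake2_pre _ _ hB]
      · rw [if_neg hB, ih _ ?_, List.append_assoc]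
        simp only [List.length_append] at hA hB ⊢
        omega

theorem pvMem_G (s : List Char) (iF k p : Int) (hp : p ∈ pvG s iF k) :
    (p = iF - k ∨ p = iF + k) ∧ pvValidA s p = true := by
  unfold pvG at hp
  split_ifs at hp <;> simp_all
  rcases hp with rfl | rfl <;> simp_all

theorem pvKey_left (iF k : Int) (h : 1 ≤ k) : pvKeyB iF (iF - k) = 2 * k := by
  unfold pvKeyB
  rw [show iF - k - iF = -k by ring, abs_neg, abs_of_pos (by omega), if_pos (by omega)]
  ring

theorem pvKey_right (iF k : Int) (h : 1 ≤ k) : pvKeyB iF (iF + k) = 2 * k + 1 := by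
  unfold pvKeyB
  rw [show iF + k - iF = k by ring, abs_of_pos (by omega), if_neg (by omega)]

theorem pvKey_G_bounds (s : List Char) (iF k p : Int) (hk : 1 ≤ k) (hp : p ∈ pvG s iF k) :
    2 * k ≤ pvKeyB iF p ∧ pvKeyB iF p ≤ 2 * k + 1 := by
  rcases (pvMem_G s iF k p hp).1 with rfl | rfl
  · rw [pvKey_left iF k hk]; omega
  · rw [pvKey_right iF k hk]; omega

-- keys strictly increase along the scan list
theorem pvPairwise_scan (s : List Char) (iF : Int) :
    ∀ (ks : List Int), ks.Pairwise (· < ·) → (∀ k ∈ ks, 1 ≤ k) →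
      (ks.flatMap (pvG s iF)).Pairwise (fun a b => pvKeyB iF a < pvKeyB iF b) := by
  intro ks
  induction ks with
  | nil => simp
  | cons k ks ih =>
    intro hpw hpos
    rw [List.flatMap_cons, List.pairwise_append]
    refine ⟨?_, ?_, ?_⟩
    · have hk : 1 ≤ k := hpos k (by simp)
      unfold pvG
      split_ifs <;> simp [pvKey_left iF k hk, pvKey_right iF k hk]
    · exact ih hpw.of_cons (fun x hx => hpos x (by simp [hx]))
    · intro a ha b hb
      have hk : 1 ≤ k := hpos k (by simp)
      obtain ⟨k', hk', hbk'⟩ := List.mem_flatMap.mp hb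
      have hkk' : k < k' := (List.pairwise_cons.mp hpw).1 k' hk'
      have h1 := (pvKey_G_bounds s iF k a hk ha).2
      have h2 := (pvKey_G_bounds s iF k' b (by omega) hbk').1
      omega

theorem pvNodup_scan (s : List Char) (iF : Int) (ks : List Int)
    (hpw : ks.Pairwise (· < ·)) (hpos : ∀ k ∈ ks, 1 ≤ k) :
    (ks.flatMap (pvG s iF)).Nodup := by
  have := pvPairwise_scan s iF ks hpw hpos
  exact List.Pairwise.imp (fun h => by intro he; rw [he] at h; omega) this

theorem pvMem_scan (s : List Char) (iF p : Int) :
    p ∈ (PySem.List.pyRange 1 51 1).flatMap (pvG s iF) ↔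
      pvValidA s p = true ∧ 1 ≤ |p - iF| ∧ |p - iF| ≤ 50 := by
  rw [List.mem_flatMap]
  constructor
  · rintro ⟨k, hk, hp⟩
    have hk' : 1 ≤ k ∧ k < 51 := PySem.List.mem_pyRange_one.mp hk
    obtain ⟨hside, hval⟩ := pvMem_G s iF k p hp
    refine ⟨hval, ?_⟩
    rcases hside with rfl | rfl
    · rw [show iF - k - iF = -k by ring, abs_neg, abs_of_pos (by omega)]; omega
    · rw [show iF + k - iF = k by ring, abs_of_pos (by omega)]; omega
  · rintro ⟨hval, h1, h2⟩
    refine ⟨|p - iF|, PySem.List.mem_pyRange_one.mpr ⟨h1, by omega⟩, ?_⟩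
    unfold pvG
    rcases abs_cases (p - iF) with ⟨he, hge⟩ | ⟨he, hlt⟩
    · have hpd : iF + |p - iF| = p := by omega
      rw [hpd, hval]
      simp
    · have hpd : iF - |p - iF| = p := by omega
      rw [hpd, hval]
      simp

theorem pvMem_cand (s : List Char) (iF p : Int) :
    p ∈ pvCandB s iF ↔ pvValidA s p = true ∧ 1 ≤ |p - iF| ∧ |p - iF| ≤ 50 := by
  unfold pvCandB pvValidA
  rw [List.mem_filter, PySem.List.mem_pyRange_one]
  constructor
  · rintro ⟨⟨h0, h1⟩, hf⟩
    simp only [Bool.and_eq_true, beq_iff_eq, decide_eq_true_eq] at hf ⊢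
    exact ⟨⟨⟨h0, h1⟩, hf.1⟩, hf.2⟩
  · rintro ⟨hv, hd⟩
    simp only [Bool.and_eq_true, beq_iff_eq, decide_eq_true_eq] at hv ⊢
    exact ⟨hv.1, hv.2, hd⟩

theorem pvNodup_cand (s : List Char) (iF : Int) : (pvCandB s iF).Nodup :=
  (PySem.List.nodup_pyRange_one 0 (s.length : Int)).filter _

-- pvValidA already forces the position in range, so cand and scan carry the same elements
theorem pvSorted_cand_eq_scan (s : List Char) (iF : Int) :
    PySem.List.sorted (pvCandB s iF) (pvKeyB iF) = (PySem.List.pyRange 1 51 1).flatMap (pvG s iF) := by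
  have hppos : ∀ k ∈ PySem.List.pyRange 1 51 1, (1:Int) ≤ k := by
    intro k hk; exact (PySem.List.mem_pyRange_one.mp hk).1
  have hpw := PySem.List.pairwise_lt_pyRange_one 1 51
  refine PySem.List.sorted_eq_of_perm_of_pairwise_lt _ _ _ ?_ (pvPairwise_scan s iF _ hpw hppos)
  rw [List.perm_ext_iff_of_nodup (pvNodup_scan s iF _ hpw hppos) (pvNodup_cand s iF)]
  intro p
  rw [pvMem_scan, pvMem_cand]

-- ===== VERDICT (by name: the statement is the Claim_ definition above) =====
theorem getAdditionalTriangle_spec : Claim_equal_getAdditionalTriangle := by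
  intro nowS i _
  unfold Spec_getAdditionalTriangle getAdditionalTriangle getAdditionalTriangle_alt
  simp only
  rw [pvSorted_cand_eq_scan, pvLoopA_eq_take _ _ _ [] (by simp), List.nil_append]
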